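-- pv_equiv track=rewrite | github.com/batesmotel34/valdedupe | valdedupe/valdedupe.py | exact_matches
-- ===== SOURCE A (Python) =====
-- def exact_matches(data_d, match_fields):
--     unique = {}
--     redundant = {}
--     for key, record in data_d.items():
--         record_hash = hash(tuple(record[f] for f in match_fields))
--         if record_hash not in redundant:
--             unique[key] = record
--             redundant[record_hash] = (key, [])
--         else:
--             redundant[record_hash][1].append(key)
--
--     return unique, {k : v for k, v in redundant.values()}
-- ===== SOURCE B (Python) =====
-- def exact_matches(data_d, match_fields):
--     pending = [(key, record, hash(tuple(record[f] for f in match_fields)))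
--                for key, record in data_d.items()]
--     unique = {}
--     redundant = {}
--     while pending:
--         key, record, h = pending[0]
--         unique[key] = record
--         redundant[key] = [k for k, _, h2 in pending[1:] if h2 == h]
--         pending = [p for p in pending[1:] if p[2] != h]
--     return unique, redundant
-- ===== Notes on version B (the rewrite author's own statement) =====
-- stated objective: alternative
-- what changed: Replaces A's single pass that maintains two dicts (keyed by record key and by record hash) with a repeated head-partition worklist: precompute each record's hash once, then repeatedly take the first pending record as a group leader, split the rest of the worklist into its matching tail and the remainder, and loop on the remainder; no hash-keyed dict is used at all.
import Mathlib
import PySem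

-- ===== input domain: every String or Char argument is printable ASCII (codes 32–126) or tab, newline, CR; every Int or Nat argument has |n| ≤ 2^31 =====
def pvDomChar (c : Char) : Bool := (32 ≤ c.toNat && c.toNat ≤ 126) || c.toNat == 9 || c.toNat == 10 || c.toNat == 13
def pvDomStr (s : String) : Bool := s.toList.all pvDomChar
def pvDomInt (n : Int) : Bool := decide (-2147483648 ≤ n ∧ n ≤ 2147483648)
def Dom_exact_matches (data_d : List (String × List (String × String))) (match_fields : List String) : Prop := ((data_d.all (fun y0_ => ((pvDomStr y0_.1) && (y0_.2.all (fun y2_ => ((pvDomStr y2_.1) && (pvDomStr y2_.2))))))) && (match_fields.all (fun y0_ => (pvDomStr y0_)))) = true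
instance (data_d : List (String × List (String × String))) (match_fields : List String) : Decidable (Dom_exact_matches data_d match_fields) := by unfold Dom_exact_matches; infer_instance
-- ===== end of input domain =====

-- B replaces A's single pass maintaining two dicts by a repeated head-partition worklist: the first
-- pending record leads a group, the rest of the worklist is split by matching signature, and the
-- loop continues on the remainder (objective: alternative).
-- Python's hash(tuple(record[f]...)) grouping is ported (in BOTH ports) as grouping by the value
-- tuple itself: exact except for hash collisions between distinct tuples, which no port can model.


-- ===== PORT A =====
-- hash(tuple(record[f] for f in match_fields)), appearing verbatim in both Pythons: ported as the
-- tuple of values itself (Pre_ guarantees every field is present, so the getD default is never read)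
def pvSig (match_fields : List String) (record : List (String × String)) : List String :=
  match_fields.map (fun f => (PySem.Dict.ofList record).getD f "")

def exact_matches (data_d : List (String × List (String × String))) (match_fields : List String) : (List (String × List (String × String))) × (List (String × List String)) :=
  let st := data_d.foldl
    (fun (st : PySem.Dict String (List (String × String)) × PySem.Dict (List String) (String × List String)) kr =>
      let h := pvSig match_fields kr.2
      if st.2.contains h = false then
        (st.1.insert kr.1 kr.2, st.2.insert h (kr.1, []))
      else
        (st.1, st.2.modify h ("", []) (fun p => (p.1, p.2 ++ [kr.1]))))
    (PySem.Dict.empty, PySem.Dict.empty)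
  (st.1.items,
   (st.2.values.foldl (fun (d : PySem.Dict String (List String)) p => d.insert p.1 p.2) PySem.Dict.empty).items)

-- ===== PORT B =====
-- the worklist [(key, record, hash(...)) ...] with the signature precomputed once per record
def pvTag (data_d : List (String × List (String × String))) (match_fields : List String) :
    List (String × List (String × String) × List String) :=
  data_d.map (fun kr => (kr.1, kr.2, pvSig match_fields kr.2))

-- the while loop: pending[0] leads a group; the rest of pending is split by its signature
def pvLoop (pending : List (String × List (String × String) × List String))
    (unique : PySem.Dict String (List (String × String)))
    (redundant : PySem.Dict String (List String)) :
    PySem.Dict String (List (String × String)) × PySem.Dict String (List String) :=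
  match pending with
  | [] => (unique, redundant)
  | p :: rest =>
      pvLoop (rest.filter (fun q => q.2.2 ≠ p.2.2))
        (unique.insert p.1 p.2.1)
        (redundant.insert p.1 ((rest.filter (fun q => q.2.2 = p.2.2)).map (·.1)))
termination_by pending.length
decreasing_by
  simp only [List.length_unattach]
  exact Nat.lt_succ_of_le (le_trans (List.length_filter_le _ _) (le_of_eq List.length_attach))

def exact_matches_alt (data_d : List (String × List (String × String))) (match_fields : List String) : (List (String × List (String × String))) × (List (String × List String)) :=
  let st := pvLoop (pvTag data_d match_fields) PySem.Dict.empty PySem.Dict.empty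
  (st.1.items, st.2.items)

-- ===== PRECONDITION & SPEC =====
-- Pre_: every record contains every match field; on any other input Python A (and Python B)
-- raises KeyError at record[f].
def Pre_exact_matches (data_d : List (String × List (String × String))) (match_fields : List String) : Prop :=
  (data_d.all (fun kr => match_fields.all (fun f => (PySem.Dict.ofList kr.2).contains f))) = true
instance (data_d : List (String × List (String × String))) (match_fields : List String) : Decidable (Pre_exact_matches data_d match_fields) := by unfold Pre_exact_matches; infer_instance

def pvWitness_exact_matches : (List (String × List (String × String))) × List String :=
  ([("a", [("f", "1"), ("g", "2")]), ("b", [("f", "1"), ("g", "9")]), ("c", [("f", "2"), ("g", "2")])], ["f"])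

def Spec_exact_matches (data_d : List (String × List (String × String))) (match_fields : List String) (out : (List (String × List (String × String))) × (List (String × List String))) : Prop := out = exact_matches_alt data_d match_fields
instance (data_d : List (String × List (String × String))) (match_fields : List String) (out : (List (String × List (String × String))) × (List (String × List String))) : Decidable (Spec_exact_matches data_d match_fields out) := by unfold Spec_exact_matches; infer_instance

-- ===== CLAIM (what is proved, stated in full; the proofs are below) =====
def Claim_equal_exact_matches : Prop := ∀ (data_d : List (String × List (String × String))) (match_fields : List String), Dom_exact_matches data_d match_fields → Pre_exact_matches data_d match_fields → Spec_exact_matches data_d match_fields (exact_matches data_d match_fields)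

-- ===== LEMMAS AND PROOFS =====

abbrev PVRec := String × List (String × String)
abbrev GD := PySem.Dict (List String) (List PVRec)

-- first key / first record / tail keys of a group (groups are never empty, defaults never read)
def pvHK (ps : List PVRec) : String := (ps.headD ("", [])).1
def pvHR (ps : List PVRec) : List (String × String) := (ps.headD ("", [])).2
def pvTL (ps : List PVRec) : List String := (ps.drop 1).map (·.1)

-- the grouping table (proof-side intermediate: signature -> records, first-occurrence key order)
def pvGroups (match_fields : List String) (l : List PVRec) : GD :=
  l.foldl (fun g kr => g.modify (pvSig match_fields kr.2) [] (fun ps => ps ++ [kr])) PySem.Dict.empty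

-- A's `unique` dict reconstructed from the grouping table
def pvU (g : GD) : PySem.Dict String (List (String × String)) :=
  g.values.foldl (fun (d : PySem.Dict String (List (String × String))) ps => d.insert (pvHK ps) (pvHR ps)) PySem.Dict.empty

-- A's `redundant` dict reconstructed from the grouping table
def pvR (g : GD) : PySem.Dict (List String) (String × List String) :=
  PySem.Dict.mk (g.items.map (fun p => (p.1, (pvHK p.2, pvTL p.2))))

-- the group lists in first-occurrence order, as filters of the input
def pvValues (match_fields : List String) (l : List PVRec) : List (List PVRec) :=
  (PySem.List.dedup (l.map (fun x => pvSig match_fields x.2))).map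
    (fun s => l.filter (fun x => pvSig match_fields x.2 = s))

lemma pvR_keys (g : GD) : (pvR g).keys = g.keys := by simp [pvR, PySem.Dict.keys]

lemma pvR_contains (g : GD) (k : List String) : (pvR g).contains k = g.contains k := by
  rw [PySem.Dict.contains_eq_decide_mem_keys, PySem.Dict.contains_eq_decide_mem_keys, pvR_keys]

lemma get?_mk_map {κ ν ω : Type} [BEq κ] [LawfulBEq κ] (l : List (κ × ν)) (f : κ → ν → ω) (k : κ) :
    (PySem.Dict.mk (l.map (fun p => (p.1, f p.1 p.2)))).get? k
      = ((PySem.Dict.mk l).get? k).map (fun v => f k v) := by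
  induction l with
  | nil => rfl
  | cons a t ih =>
    by_cases h : a.1 = k
    · subst h; simp [PySem.Dict.get?, List.find?]
    · have hb : (a.1 == k) = false := beq_eq_false_iff_ne.mpr h
      simpa [PySem.Dict.get?, List.find?, hb] using ih

lemma pvR_getD (g : GD) (k : List String) (hc : g.contains k = true) :
    (pvR g).getD k ("", []) = (pvHK (g.getD k []), pvTL (g.getD k [])) := by
  rw [PySem.Dict.contains_eq_isSome_get?] at hc
  obtain ⟨v, hv⟩ := Option.isSome_iff_exists.mp hc
  have h1 := get?_mk_map g.items (fun _ v => (pvHK v, pvTL v)) k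
  simp only [PySem.Dict.getD, pvR, h1]
  have h2 : PySem.Dict.mk g.items = g := rfl
  rw [h2, hv]
  simp

lemma pv_items_new (g : GD) (h : List String) (kr : PVRec) (hc : g.contains h = false) :
    (g.modify h [] (fun ps => ps ++ [kr])).items = g.items ++ [(h, [kr])] := by
  have he : g.modify h [] (fun ps => ps ++ [kr]) = g.insert h ((g.getD h []) ++ [kr]) := rfl
  rw [he, PySem.Dict.getD_of_not_contains _ _ hc, PySem.Dict.items_insert_of_not_contains _ _ hc]
  simp

lemma pvU_new (g : GD) (h : List String) (kr : PVRec) (hc : g.contains h = false) :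
    pvU (g.modify h [] (fun ps => ps ++ [kr])) = (pvU g).insert kr.1 kr.2 := by
  simp only [pvU, PySem.Dict.values, pv_items_new g h kr hc]
  simp [pvHK, pvHR]

lemma pvR_new (g : GD) (h : List String) (kr : PVRec) (hc : g.contains h = false) :
    pvR (g.modify h [] (fun ps => ps ++ [kr])) = (pvR g).insert h (kr.1, []) := by
  apply PySem.Dict.ext
  rw [PySem.Dict.items_insert_of_not_contains _ _ (by rw [pvR_contains]; exact hc)]
  simp only [pvR, pv_items_new g h kr hc]
  simp [pvHK, pvTL]

lemma hk_append (ps qs : List PVRec) (h : ps ≠ []) :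
    pvHK (ps ++ qs) = pvHK ps := by
  cases ps with
  | nil => exact absurd rfl h
  | cons a t => simp [pvHK]

lemma hr_append (ps qs : List PVRec) (h : ps ≠ []) :
    pvHR (ps ++ qs) = pvHR ps := by
  cases ps with
  | nil => exact absurd rfl h
  | cons a t => simp [pvHR]

lemma tl_append_singleton (ps : List PVRec) (q : PVRec) (h : ps ≠ []) :
    pvTL (ps ++ [q]) = pvTL ps ++ [q.1] := by
  cases ps with
  | nil => exact absurd rfl h
  | cons a t => simp [pvTL]

lemma pv_items_old (g : GD) (h : List String) (kr : PVRec) (hc : g.contains h = true) :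
    (g.modify h [] (fun ps => ps ++ [kr])).items
      = g.items.map (fun p => if (p.1 == h) = true then (h, g.getD h [] ++ [kr]) else p) := by
  have he : g.modify h [] (fun ps => ps ++ [kr]) = g.insert h ((g.getD h []) ++ [kr]) := rfl
  rw [he, PySem.Dict.items_insert_of_contains _ _ hc]

lemma pv_mem_val (g : GD) (h : List String) (p : (List String) × List PVRec)
    (hmem : p ∈ g.items) (hph : (p.1 == h) = true) (hnd : g.keys.Nodup) : p.2 = g.getD h [] := by
  have h1 : g.get? p.1 = some p.2 := PySem.Dict.get?_of_mem_items g hmem hnd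
  have h2 : p.1 = h := eq_of_beq hph
  rw [h2] at h1
  simp [PySem.Dict.getD, h1]

lemma pvU_old (g : GD) (h : List String) (kr : PVRec) (hc : g.contains h = true)
    (hne : ∀ p ∈ g.items, p.2 ≠ []) (hnd : g.keys.Nodup) :
    pvU (g.modify h [] (fun ps => ps ++ [kr])) = pvU g := by
  simp only [pvU, PySem.Dict.values, pv_items_old g h kr hc, List.map_map, List.foldl_map]
  apply PySem.List.foldl_congr_mem
  intro acc p hp
  by_cases hph : (p.1 == h) = true
  · have hv := pv_mem_val g h p hp hph hnd
    have hnil : p.2 ≠ [] := hne p hp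
    simp only [Function.comp, hph, if_pos]
    rw [← hv, hk_append _ _ hnil, hr_append _ _ hnil]
  · simp only [Function.comp, hph]
    simp

lemma pvR_old (g : GD) (h : List String) (kr : PVRec) (hc : g.contains h = true)
    (hne : ∀ p ∈ g.items, p.2 ≠ []) (hnd : g.keys.Nodup) :
    pvR (g.modify h [] (fun ps => ps ++ [kr]))
      = (pvR g).modify h ("", []) (fun p => (p.1, p.2 ++ [kr.1])) := by
  have he : (pvR g).modify h ("", []) (fun p => (p.1, p.2 ++ [kr.1]))
      = (pvR g).insert h ((pvHK (g.getD h []), pvTL (g.getD h []) ++ [kr.1])) := by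
    have h1 : (pvR g).modify h ("", []) (fun p => (p.1, p.2 ++ [kr.1]))
        = (pvR g).insert h ((fun p => (p.1, p.2 ++ [kr.1])) ((pvR g).getD h ("", []))) := rfl
    rw [h1, pvR_getD g h hc]
  apply PySem.Dict.ext
  rw [he, PySem.Dict.items_insert_of_contains _ _ (by rw [pvR_contains]; exact hc)]
  simp only [pvR, pv_items_old g h kr hc, List.map_map]
  apply List.map_congr_left
  intro p hp
  by_cases hph : (p.1 == h) = true
  · have hv := pv_mem_val g h p hp hph hnd
    have hnil : p.2 ≠ [] := hne p hp
    simp only [Function.comp, hph, if_pos]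
    rw [← hv, hk_append _ _ hnil, tl_append_singleton _ _ hnil]
  · simp [Function.comp, hph]

lemma pv_inv_ne (g : GD) (h : List String) (kr : PVRec)
    (hne : ∀ p ∈ g.items, p.2 ≠ []) :
    ∀ p ∈ (g.modify h [] (fun ps => ps ++ [kr])).items, p.2 ≠ [] := by
  intro p hp
  have he : g.modify h [] (fun ps => ps ++ [kr]) = g.insert h ((g.getD h []) ++ [kr]) := rfl
  rw [he] at hp
  rcases (PySem.Dict.mem_items_insert _ _ _ _).mp hp with h1 | h2
  · rw [h1]; simp
  · exact hne p h2.1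

lemma pv_inv_nd (g : GD) (h : List String) (kr : PVRec)
    (hnd : g.keys.Nodup) :
    (g.modify h [] (fun ps => ps ++ [kr])).keys.Nodup := by
  have he : g.modify h [] (fun ps => ps ++ [kr]) = g.insert h ((g.getD h []) ++ [kr]) := rfl
  rw [he]
  exact PySem.Dict.nodup_keys_insert _ _ _ hnd

-- the loop invariant of PORT A: A's fold over the remaining records, started from the projections
-- of an intermediate grouping table g, lands on the projections of the extended grouping table
lemma pv_main (match_fields : List String) (l : List PVRec)
    (g : GD) (hne : ∀ p ∈ g.items, p.2 ≠ []) (hnd : g.keys.Nodup) :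
    l.foldl
      (fun (st : PySem.Dict String (List (String × String)) × PySem.Dict (List String) (String × List String)) kr =>
        let h := pvSig match_fields kr.2
        if st.2.contains h = false then
          (st.1.insert kr.1 kr.2, st.2.insert h (kr.1, []))
        else
          (st.1, st.2.modify h ("", []) (fun p => (p.1, p.2 ++ [kr.1]))))
      (pvU g, pvR g)
    = (pvU (l.foldl (fun g kr => g.modify (pvSig match_fields kr.2) [] (fun ps => ps ++ [kr])) g),
       pvR (l.foldl (fun g kr => g.modify (pvSig match_fields kr.2) [] (fun ps => ps ++ [kr])) g)) := by
  induction l generalizing g with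
  | nil => rfl
  | cons kr t ih =>
    simp only [List.foldl_cons]
    set h := pvSig match_fields kr.2 with hh
    have hstep :
        (if (pvR g).contains h = false then
          ((pvU g).insert kr.1 kr.2, (pvR g).insert h (kr.1, []))
        else
          (pvU g, (pvR g).modify h ("", []) (fun p => (p.1, p.2 ++ [kr.1]))))
        = (pvU (g.modify h [] (fun ps => ps ++ [kr])), pvR (g.modify h [] (fun ps => ps ++ [kr]))) := by
      rw [pvR_contains]
      by_cases hc : g.contains h = true
      · rw [hc, if_neg (show ¬(true = false) by simp)]
        rw [pvU_old g h kr hc hne hnd, pvR_old g h kr hc hne hnd]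
      · have hc' : g.contains h = false := by simpa using hc
        rw [hc', if_pos rfl]
        rw [pvU_new g h kr hc', pvR_new g h kr hc']
    show t.foldl _ (if (pvR g).contains h = false then _ else _) = _
    rw [hstep]
    exact ih (g.modify h [] (fun ps => ps ++ [kr])) (pv_inv_ne g h kr hne) (pv_inv_nd g h kr hnd)

-- ----- characterization of the grouping table as filters of the input -----

lemma pv_add_of_mem {α : Type} [BEq α] [LawfulBEq α] (s : PySem.Set α) (a : α) (h : a ∈ s) :
    PySem.Set.add s a = s := by
  simp [PySem.Set.add, PySem.Set.contains, h]

lemma pv_foldl_add_filter {α : Type} [BEq α] [LawfulBEq α] (a : α) (l : List α) :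
    ∀ (s : PySem.Set α), a ∈ s →
      l.foldl PySem.Set.add s = (l.filter (fun x => x != a)).foldl PySem.Set.add s := by
  induction l with
  | nil => intro s _; rfl
  | cons x t ih =>
    intro s hs
    rw [List.filter_cons]
    by_cases hx : x = a
    · subst hx
      simp only [bne_self_eq_false, Bool.false_eq_true, if_false, List.foldl_cons,
        pv_add_of_mem s x hs]
      exact ih s hs
    · simp only [bne_iff_ne, ne_eq, hx, not_false_eq_true, if_true, List.foldl_cons]
      exact ih _ ((PySem.Set.mem_add _ _ _).mpr (Or.inl hs))

lemma pv_foldl_add_cons {α : Type} [BEq α] [LawfulBEq α] (a : α) (l : List α) :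
    ∀ (s : PySem.Set α), (∀ x ∈ l, x ≠ a) →
      l.foldl PySem.Set.add (a :: s) = a :: l.foldl PySem.Set.add s := by
  induction l with
  | nil => intro s _; rfl
  | cons x t ih =>
    intro s hl
    have hx : x ≠ a := hl x (by simp)
    have hstep : PySem.Set.add (a :: s) x = a :: PySem.Set.add s x := by
      by_cases hm : x ∈ s
      · rw [pv_add_of_mem _ _ (by simp [hm]), pv_add_of_mem _ _ hm]
      · have h1 : ¬ x ∈ (a :: s : List α) := by simp [hx, hm]
        simp [PySem.Set.add, PySem.Set.contains, hm, h1]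
    simp only [List.foldl_cons, hstep]
    exact ih _ (fun y hy => hl y (by simp [hy]))

lemma pv_dedup_cons {α : Type} [BEq α] [LawfulBEq α] (a : α) (l : List α) :
    PySem.List.dedup (a :: l) = a :: PySem.List.dedup (l.filter (fun x => x != a)) := by
  rw [PySem.List.dedup_eq_ofList, PySem.List.dedup_eq_ofList,
    PySem.Set.ofList_eq_foldl, PySem.Set.ofList_eq_foldl]
  have h0 : PySem.Set.add [] a = [a] := rfl
  rw [List.foldl_cons, h0]
  rw [pv_foldl_add_filter a l [a] (by simp)]
  have hne : ∀ x ∈ l.filter (fun x => x != a), x ≠ a := by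
    intro x hx
    simpa using (List.of_mem_filter hx)
  simpa using pv_foldl_add_cons a (l.filter (fun x => x != a)) [] hne

lemma pv_ne_of_mem_items (g : GD) (p : (List String) × List PVRec) (s : List String)
    (hp : p ∈ g.items) (hc : g.contains s = false) : p.1 ≠ s := by
  intro h
  rw [PySem.Dict.contains_eq_decide_mem_keys] at hc
  have hm := PySem.Dict.mem_keys_of_mem_items g hp
  rw [h] at hm
  simp [hm] at hc

lemma pv_groups_aux (match_fields : List String) (l : List PVRec) :
    ∀ (g : GD), g.keys.Nodup →
    (l.foldl (fun g kr => g.modify (pvSig match_fields kr.2) [] (fun ps => ps ++ [kr])) g).items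
      = g.items.map (fun p => (p.1, p.2 ++ l.filter (fun x => pvSig match_fields x.2 = p.1)))
        ++ (PySem.List.dedup ((l.filter (fun x => !(g.contains (pvSig match_fields x.2)))).map
              (fun x => pvSig match_fields x.2))).map
            (fun s => (s, l.filter (fun x => pvSig match_fields x.2 = s))) := by
  induction l with
  | nil => intro g _; simp
  | cons kr t ih =>
    intro g hnd
    simp only [List.foldl_cons]
    by_cases hc : g.contains (pvSig match_fields kr.2) = true
    · rw [ih _ (pv_inv_nd g (pvSig match_fields kr.2) kr hnd)]
      congr 1
      · rw [pv_items_old g _ kr hc, List.map_map]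
        apply List.map_congr_left
        intro p hp
        by_cases hph : (p.1 == pvSig match_fields kr.2) = true
        · have hv := pv_mem_val g _ p hp hph hnd
          have he : p.1 = pvSig match_fields kr.2 := eq_of_beq hph
          simp only [Function.comp, List.filter_cons, ← he]
          simp only [decide_true, if_true]
          rw [hv]
          simp [he]
        · simp only [Function.comp, hph, Bool.false_eq_true, if_false, List.filter_cons]
          have : (decide (pvSig match_fields kr.2 = p.1)) = false := by
            simp only [decide_eq_false_iff_not]
            intro h
            have h2 : p.1 = pvSig match_fields kr.2 := h.symm
            exact hph (by simp [h2])
          simp [this]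
      · have hfil : (t.filter (fun x => !((g.modify (pvSig match_fields kr.2) []
              (fun ps => ps ++ [kr])).contains (pvSig match_fields x.2))))
            = t.filter (fun x => !(g.contains (pvSig match_fields x.2))) := by
          apply List.filter_congr
          intro x _
          rw [PySem.Dict.contains_modify]
          by_cases hx : (pvSig match_fields x.2 == pvSig match_fields kr.2) = true
          · rw [hx, eq_of_beq hx]
            simp [hc]
          · simp only [Bool.not_eq_true] at hx
            rw [hx]
            simp
        have hfil2 : ((kr :: t).filter (fun x => !(g.contains (pvSig match_fields x.2))))
            = t.filter (fun x => !(g.contains (pvSig match_fields x.2))) := by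
          rw [List.filter_cons]
          simp [hc]
        rw [hfil, hfil2]
        apply List.map_congr_left
        intro s' hs'
        have hs'mem : s' ∈ (t.filter (fun x => !(g.contains (pvSig match_fields x.2)))).map
            (fun x => pvSig match_fields x.2) := (PySem.List.mem_dedup _ _).mp hs'
        obtain ⟨x, hx, hxs⟩ := List.mem_map.mp hs'mem
        have hgc : g.contains s' = false := by
          have := List.of_mem_filter hx
          simpa [hxs] using this
        have hne : pvSig match_fields kr.2 ≠ s' := by
          intro h
          rw [h] at hc
          rw [hc] at hgc
          simp at hgc
        rw [List.filter_cons]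
        simp [hne]
    · have hc' : g.contains (pvSig match_fields kr.2) = false := by simpa using hc
      rw [ih _ (pv_inv_nd g (pvSig match_fields kr.2) kr hnd)]
      rw [pv_items_new g _ kr hc', List.map_append]
      have hcm : ∀ (x : PVRec), (g.modify (pvSig match_fields kr.2) [] (fun ps => ps ++ [kr])).contains
          (pvSig match_fields x.2)
          = ((pvSig match_fields x.2 == pvSig match_fields kr.2) || g.contains (pvSig match_fields x.2)) :=
        fun x => PySem.Dict.contains_modify g _ _ [] _
      have hXfil : ((kr :: t).filter (fun x => !(g.contains (pvSig match_fields x.2)))).map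
            (fun x => pvSig match_fields x.2)
          = pvSig match_fields kr.2 ::
            (t.filter (fun x => !(g.contains (pvSig match_fields x.2)))).map (fun x => pvSig match_fields x.2) := by
        rw [List.filter_cons]
        simp [hc']
      rw [hXfil, pv_dedup_cons]
      have hfil : ((t.filter (fun x => !(g.contains (pvSig match_fields x.2)))).map
            (fun x => pvSig match_fields x.2)).filter (fun y => y != pvSig match_fields kr.2)
          = (t.filter (fun x => !((g.modify (pvSig match_fields kr.2) []
              (fun ps => ps ++ [kr])).contains (pvSig match_fields x.2)))).map
            (fun x => pvSig match_fields x.2) := by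
        rw [List.filter_map, List.filter_filter]
        congr 1
        apply List.filter_congr
        intro x _
        rw [hcm x]
        simp [Function.comp, bne, Bool.not_or]
      rw [← hfil]
      simp only [List.map_cons]
      rw [List.append_assoc]
      congr 1
      · apply List.map_congr_left
        intro p hp
        have hne := pv_ne_of_mem_items g p _ hp hc'
        rw [List.filter_cons]
        have hd : (decide (pvSig match_fields kr.2 = p.1)) = false := by
          simp only [decide_eq_false_iff_not]
          exact fun h => hne h.symm
        simp [hd]
      · rw [List.singleton_append]
        simp only [List.map_nil]
        have htail : List.map (fun s => (s, List.filter (fun x => decide (pvSig match_fields x.2 = s)) (kr :: t)))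
              (PySem.List.dedup (List.filter (fun y => y != pvSig match_fields kr.2)
                (List.map (fun x => pvSig match_fields x.2)
                  (List.filter (fun x => !PySem.Dict.contains g (pvSig match_fields x.2)) t))))
            = List.map (fun s => (s, List.filter (fun x => decide (pvSig match_fields x.2 = s)) t))
              (PySem.List.dedup (List.filter (fun y => y != pvSig match_fields kr.2)
                (List.map (fun x => pvSig match_fields x.2)
                  (List.filter (fun x => !PySem.Dict.contains g (pvSig match_fields x.2)) t)))) := by
          apply List.map_congr_left
          intro s' hs'
          have hs'ne : s' ≠ pvSig match_fields kr.2 := by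
            have := List.of_mem_filter ((PySem.List.mem_dedup _ _).mp hs')
            simpa using this
          rw [List.filter_cons]
          have hd : (decide (pvSig match_fields kr.2 = s')) = false := by
            simp only [decide_eq_false_iff_not]
            exact fun h => hs'ne h.symm
          simp [hd]
        rw [htail, List.filter_cons]
        simp

lemma groups_items (match_fields : List String) (l : List PVRec) :
    (pvGroups match_fields l).items
      = (PySem.List.dedup (l.map (fun x => pvSig match_fields x.2))).map
          (fun s => (s, l.filter (fun x => pvSig match_fields x.2 = s))) := by
  have h := pv_groups_aux match_fields l PySem.Dict.empty (by simp [PySem.Dict.keys, PySem.Dict.empty])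
  have he : (PySem.Dict.empty : GD).items = [] := rfl
  have hf : l.filter (fun x => !((PySem.Dict.empty : GD).contains (pvSig match_fields x.2))) = l := by
    apply List.filter_eq_self.mpr
    intro x _
    simp [PySem.Dict.contains_empty]
  rw [pvGroups, h, he, hf]
  simp

lemma values_groups (match_fields : List String) (l : List PVRec) :
    (pvGroups match_fields l).values = pvValues match_fields l := by
  simp only [PySem.Dict.values, groups_items, pvValues, List.map_map]
  rfl

-- ----- PORT B equals the folds over the group lists -----

lemma tag_filter_ne (match_fields : List String) (t : List PVRec) (s : List String) :
    (pvTag t match_fields).filter (fun q => q.2.2 ≠ s)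
      = pvTag (t.filter (fun x => pvSig match_fields x.2 ≠ s)) match_fields := by
  simp [pvTag, List.filter_map, Function.comp_def]

lemma tag_filter_eq (match_fields : List String) (t : List PVRec) (s : List String) :
    ((pvTag t match_fields).filter (fun q => q.2.2 = s)).map (·.1)
      = ((t.filter (fun x => pvSig match_fields x.2 = s)).map (·.1)) := by
  simp [pvTag, List.filter_map, Function.comp_def]

lemma pvValues_cons (match_fields : List String) (kr : PVRec) (t : List PVRec) :
    pvValues match_fields (kr :: t)
      = (kr :: t.filter (fun x => pvSig match_fields x.2 = pvSig match_fields kr.2))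
        :: pvValues match_fields (t.filter (fun x => pvSig match_fields x.2 ≠ pvSig match_fields kr.2)) := by
  simp only [pvValues, List.map_cons]
  rw [pv_dedup_cons, List.map_cons]
  have hmf : (t.map (fun x => pvSig match_fields x.2)).filter (fun y => y != pvSig match_fields kr.2)
      = (t.filter (fun x => pvSig match_fields x.2 ≠ pvSig match_fields kr.2)).map
          (fun x => pvSig match_fields x.2) := by
    rw [List.filter_map]
    congr 1
    apply List.filter_congr
    intro x _
    simp only [Function.comp, bne]
    cases hb : (pvSig match_fields x.2 == pvSig match_fields kr.2)
    · have hne : ¬ pvSig match_fields x.2 = pvSig match_fields kr.2 := by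
        intro h
        rw [h] at hb
        simp at hb
      simp [hne]
    · simp [eq_of_beq hb]
  congr 1
  · rw [List.filter_cons]
    simp
  · rw [hmf]
    apply List.map_congr_left
    intro s' hs'
    have hs'ne : s' ≠ pvSig match_fields kr.2 := by
      obtain ⟨x, hx, hxs⟩ := List.mem_map.mp ((PySem.List.mem_dedup _ _).mp hs')
      rw [← hxs]
      simpa using List.of_mem_filter hx
    have hd : (decide (pvSig match_fields kr.2 = s')) = false := by
      simp only [decide_eq_false_iff_not]
      exact fun h => hs'ne h.symm
    have hff : (t.filter (fun x => pvSig match_fields x.2 ≠ pvSig match_fields kr.2)).filter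
          (fun x => pvSig match_fields x.2 = s')
        = t.filter (fun x => pvSig match_fields x.2 = s') := by
      rw [List.filter_filter]
      apply List.filter_congr
      intro x _
      by_cases hx : pvSig match_fields x.2 = s'
      · simp [hx, hs'ne]
      · simp [hx]
    rw [List.filter_cons, hd]
    simp only [Bool.false_eq_true, if_false]
    exact hff.symm

lemma loop_eq (match_fields : List String) (n : Nat) (l : List PVRec) (hl : l.length ≤ n)
    (u : PySem.Dict String (List (String × String))) (r : PySem.Dict String (List String)) :
    pvLoop (pvTag l match_fields) u r
      = ((pvValues match_fields l).foldl (fun d ps => d.insert (pvHK ps) (pvHR ps)) u,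
         (pvValues match_fields l).foldl (fun d ps => d.insert (pvHK ps) (pvTL ps)) r) := by
  induction n generalizing l u r with
  | zero =>
    have hnil : l = [] := List.eq_nil_of_length_eq_zero (Nat.le_zero.mp hl)
    subst hnil
    simp [pvTag, pvValues, pvLoop, PySem.List.dedup, PySem.Set.ofList]
  | succ n ih =>
    cases l with
    | nil => simp [pvTag, pvValues, pvLoop, PySem.List.dedup, PySem.Set.ofList]
    | cons kr t =>
      have hstep : pvTag (kr :: t) match_fields
          = (kr.1, kr.2, pvSig match_fields kr.2) :: pvTag t match_fields := by simp [pvTag]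
      rw [hstep, pvLoop]
      rw [tag_filter_ne, tag_filter_eq]
      rw [ih (t.filter (fun x => pvSig match_fields x.2 ≠ pvSig match_fields kr.2))
            (le_trans (List.length_filter_le _ _) (Nat.succ_le_succ_iff.mp hl)) _ _]
      rw [pvValues_cons]
      simp only [List.foldl_cons]
      have hk : pvHK (kr :: t.filter (fun x => pvSig match_fields x.2 = pvSig match_fields kr.2)) = kr.1 := rfl
      have hh : pvHR (kr :: t.filter (fun x => pvSig match_fields x.2 = pvSig match_fields kr.2)) = kr.2 := rfl
      have ht : pvTL (kr :: t.filter (fun x => pvSig match_fields x.2 = pvSig match_fields kr.2))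
          = (t.filter (fun x => pvSig match_fields x.2 = pvSig match_fields kr.2)).map (·.1) := rfl
      rw [hk, hh, ht]

lemma pv_final (data_d : List (String × List (String × String))) (match_fields : List String) :
    exact_matches data_d match_fields = exact_matches_alt data_d match_fields := by
  have h0 : (pvU PySem.Dict.empty, pvR PySem.Dict.empty)
      = ((PySem.Dict.empty : PySem.Dict String (List (String × String))),
         (PySem.Dict.empty : PySem.Dict (List String) (String × List String))) := rfl
  have hm := pv_main match_fields data_d PySem.Dict.empty (by intro p hp; cases hp)
    (by simp [PySem.Dict.keys, PySem.Dict.empty])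
  rw [h0] at hm
  have hb := loop_eq match_fields data_d.length data_d le_rfl PySem.Dict.empty PySem.Dict.empty
  have hG : (data_d.foldl (fun g kr => g.modify (pvSig match_fields kr.2) [] (fun ps => ps ++ [kr]))
      (PySem.Dict.empty : GD)) = pvGroups match_fields data_d := rfl
  rw [hG] at hm
  have hu : pvU (pvGroups match_fields data_d)
      = (pvValues match_fields data_d).foldl (fun dd ps => dd.insert (pvHK ps) (pvHR ps)) PySem.Dict.empty := by
    rw [pvU, values_groups]
  have hr : ((pvR (pvGroups match_fields data_d)).values.foldl
        (fun (dd : PySem.Dict String (List String)) p => dd.insert p.1 p.2) PySem.Dict.empty)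
      = (pvValues match_fields data_d).foldl (fun dd ps => dd.insert (pvHK ps) (pvTL ps)) PySem.Dict.empty := by
    rw [← values_groups]
    simp only [pvR, PySem.Dict.values, List.map_map, List.foldl_map]
    rfl
  simp only [exact_matches, exact_matches_alt, hm, hb, hu, hr]

-- ===== VERDICT (by name: the statement is the Claim_ definition above) =====
theorem exact_matches_spec : Claim_equal_exact_matches := by
  intro data_d match_fields _ _
  unfold Spec_exact_matches
  exact pv_final data_d match_fields
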